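-- pv_equiv track=rewrite | github.com/pvestal/tower-echo-brain | directors/ethics_director.py | _get_privacy_recommendations
-- ===== SOURCE A (Python) =====
-- from typing import Dict, List, Any, Optional, Tuple, Set
--
-- def _get_privacy_recommendations(privacy_issues: List[Dict[str, Any]]) -> List[str]:
--     """Get privacy enhancement recommendations."""
--     recommendations = []
--     issue_types = {issue.get("type") for issue in privacy_issues}
--
--     if "data_collection_without_consent" in issue_types:
--         recommendations.append("Implement clear consent mechanisms")
--
--     if "excessive_data_collection" in issue_types:
--         recommendations.append("Apply data minimization principles")
--
--     if "missing_encryption" in issue_types: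
--         recommendations.append("Implement end-to-end encryption")
--
--     return recommendations
-- ===== SOURCE B (Python) =====
-- from typing import Dict, List, Any
--
-- _PRIVACY_RECS = [
--     ("data_collection_without_consent", "Implement clear consent mechanisms"),
--     ("excessive_data_collection", "Apply data minimization principles"),
--     ("missing_encryption", "Implement end-to-end encryption"),
-- ]
--
-- def _get_privacy_recommendations(privacy_issues: List[Dict[str, Any]]) -> List[str]:
--     """Get privacy enhancement recommendations (table-driven)."""
--     return [rec for issue_type, rec in _PRIVACY_RECS
--             if any(issue.get("type") == issue_type for issue in privacy_issues)]
-- ===== Notes on version B (the rewrite author's own statement) =====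
-- stated objective: simpler
-- what changed: Replaces the set-build plus three separate if-branches with a fixed (type, recommendation) table filtered by a single any-scan per entry, with no intermediate set.
import Mathlib
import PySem

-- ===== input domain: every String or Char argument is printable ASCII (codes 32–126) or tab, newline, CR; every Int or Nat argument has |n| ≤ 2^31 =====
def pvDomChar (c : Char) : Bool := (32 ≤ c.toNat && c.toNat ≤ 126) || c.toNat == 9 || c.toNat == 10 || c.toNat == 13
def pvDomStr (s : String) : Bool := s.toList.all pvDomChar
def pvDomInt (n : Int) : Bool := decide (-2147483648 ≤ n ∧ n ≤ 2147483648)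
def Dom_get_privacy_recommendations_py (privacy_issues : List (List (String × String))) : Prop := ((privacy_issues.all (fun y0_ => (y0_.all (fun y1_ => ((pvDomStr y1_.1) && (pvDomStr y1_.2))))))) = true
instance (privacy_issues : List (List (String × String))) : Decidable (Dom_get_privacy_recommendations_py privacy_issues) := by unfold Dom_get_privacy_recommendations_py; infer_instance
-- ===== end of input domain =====

-- B is a table-driven rewrite of A: a fixed (type, recommendation) list filtered by one
-- any-scan per entry, instead of the intermediate set and three separate if-branches.

-- issue.get("type") on a dict-as-association-list: first match (exact for Python dicts, whose keys are unique)
def pvGetType (issue : List (String × String)) : Option String :=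
  (issue.find? (fun p => p.1 == "type")).map (·.2)

-- ===== PORT A =====
def get_privacy_recommendations_py (privacy_issues : List (List (String × String))) : List String :=
  let issue_types : PySem.Set (Option String) :=
    PySem.Set.ofList (privacy_issues.map pvGetType)
  let recommendations : List String := []
  let recommendations :=
    if some "data_collection_without_consent" ∈ issue_types then
      recommendations ++ ["Implement clear consent mechanisms"] else recommendations
  let recommendations :=
    if some "excessive_data_collection" ∈ issue_types then
      recommendations ++ ["Apply data minimization principles"] else recommendations
  let recommendations :=
    if some "missing_encryption" ∈ issue_types then
      recommendations ++ ["Implement end-to-end encryption"] else recommendations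
  recommendations

-- ===== PORT B =====
def pvRecTable : List (String × String) :=
  [("data_collection_without_consent", "Implement clear consent mechanisms"),
   ("excessive_data_collection", "Apply data minimization principles"),
   ("missing_encryption", "Implement end-to-end encryption")]

def get_privacy_recommendations_py_alt (privacy_issues : List (List (String × String))) : List String :=
  (pvRecTable.filter
    (fun p => privacy_issues.any (fun issue => pvGetType issue == some p.1))).map (·.2)

-- ===== PRECONDITION & SPEC =====
def Spec_get_privacy_recommendations_py (privacy_issues : List (List (String × String))) (out : List String) : Prop := out = get_privacy_recommendations_py_alt privacy_issues
instance (privacy_issues : List (List (String × String))) (out : List String) : Decidable (Spec_get_privacy_recommendations_py privacy_issues out) := by unfold Spec_get_privacy_recommendations_py; infer_instance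

-- ===== CLAIM (what is proved, stated in full; the proofs are below) =====
def Claim_equal_get_privacy_recommendations_py : Prop := ∀ (privacy_issues : List (List (String × String))), Dom_get_privacy_recommendations_py privacy_issues → Spec_get_privacy_recommendations_py privacy_issues (get_privacy_recommendations_py privacy_issues)

-- ===== LEMMAS AND PROOFS =====

-- B's any-scan for a type is membership of that type in A's set
theorem pv_any_eq_mem (xs : List (List (String × String))) (t : String) :
    xs.any (fun issue => pvGetType issue == some t) =
      decide (some t ∈ PySem.Set.ofList (xs.map pvGetType)) := by
  rw [Bool.eq_iff_iff]
  simp only [List.any_eq_true, beq_iff_eq, decide_eq_true_eq, PySem.Set.mem_ofList,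
    List.mem_map]

-- ===== VERDICT (by name: the statement is the Claim_ definition above) =====
theorem get_privacy_recommendations_py_spec : Claim_equal_get_privacy_recommendations_py := by
  intro xs _
  unfold Spec_get_privacy_recommendations_py get_privacy_recommendations_py
    get_privacy_recommendations_py_alt pvRecTable
  by_cases h1 : some "data_collection_without_consent" ∈ PySem.Set.ofList (xs.map pvGetType) <;>
  by_cases h2 : some "excessive_data_collection" ∈ PySem.Set.ofList (xs.map pvGetType) <;>
  by_cases h3 : some "missing_encryption" ∈ PySem.Set.ofList (xs.map pvGetType) <;>
    simp [List.filter, pv_any_eq_mem, h1, h2, h3]
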